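-- pv_equiv track=rewrite | github.com/manoel-alves/Sistema_Hospitalar | utils/validacoes.py | valida_rg
-- ===== SOURCE A (Python) =====
-- def valida_rg(rg:str):
--     # x.xxx.xxx-x
--     if len(rg) != 11:
--         return False
--
--     for i in range(len(rg)):
--         if i not in [1, 5, 9]:
--             if not rg[i].isdigit():
--                 return False
--         elif i in [1, 5] and rg[i] != '.':
--             return False
--         elif i == 9 and rg[i] != '-':
--             return False
--
--     return True
-- ===== SOURCE B (Python) =====
-- def valida_rg(rg: str):
--     # x.xxx.xxx-x : straight-line structural check, no index loop
--     return (len(rg) == 11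
--             and rg[0].isdigit() and rg[1] == '.'
--             and rg[2:5].isdigit() and rg[5] == '.'
--             and rg[6:9].isdigit() and rg[9] == '-'
--             and rg[10].isdigit())
-- ===== Notes on version B (the rewrite author's own statement) =====
-- stated objective: simpler
-- what changed: Replaced the index loop with membership tests [1,5,9] and early returns by a single straight-line boolean conjunction that checks the fixed separator positions and validates each digit group as a whole slice.
import Mathlib
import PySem

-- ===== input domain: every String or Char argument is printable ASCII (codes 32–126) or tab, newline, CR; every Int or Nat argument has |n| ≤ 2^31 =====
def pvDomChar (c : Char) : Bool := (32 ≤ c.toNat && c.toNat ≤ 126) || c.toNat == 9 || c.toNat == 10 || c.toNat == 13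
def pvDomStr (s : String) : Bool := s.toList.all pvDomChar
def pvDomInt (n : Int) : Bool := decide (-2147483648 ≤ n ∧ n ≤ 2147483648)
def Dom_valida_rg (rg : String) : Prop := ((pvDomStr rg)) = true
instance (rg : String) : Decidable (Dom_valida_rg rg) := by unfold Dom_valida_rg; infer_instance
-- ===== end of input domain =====

-- B replaces A's index loop (with per-index membership tests) by a straight-line
-- boolean conjunction over fixed positions and whole digit-group slices (objective: simpler).

-- ===== PORT A =====
def valida_rg (rg : String) : Bool :=
  if PySem.Str.len rg ≠ 11 then false
  else
    (PySem.List.pyRange 0 (PySem.Str.len rg) 1).all (fun i =>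
      if i ∉ ([1, 5, 9] : List Int) then
        PySem.Chars.isdigit (PySem.List.pyGetD rg.toList i ' ')
      else if i ∈ ([1, 5] : List Int) && !(PySem.List.pyGetD rg.toList i ' ' == '.') then
        false
      else if i == 9 && !(PySem.List.pyGetD rg.toList i ' ' == '-') then
        false
      else
        true)

-- ===== PORT B =====
def valida_rg_alt (rg : String) : Bool :=
  decide (PySem.Str.len rg = 11)
  && PySem.Chars.isdigit (PySem.List.pyGetD rg.toList 0 ' ')
  && (PySem.List.pyGetD rg.toList 1 ' ' == '.')
  && PySem.Chars.strIsdigit (PySem.Chars.slice rg.toList (some 2) (some 5))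
  && (PySem.List.pyGetD rg.toList 5 ' ' == '.')
  && PySem.Chars.strIsdigit (PySem.Chars.slice rg.toList (some 6) (some 9))
  && (PySem.List.pyGetD rg.toList 9 ' ' == '-')
  && PySem.Chars.isdigit (PySem.List.pyGetD rg.toList 10 ' ')

-- ===== PRECONDITION & SPEC =====
def Spec_valida_rg (rg : String) (out : Bool) : Prop := out = valida_rg_alt rg
instance (rg : String) (out : Bool) : Decidable (Spec_valida_rg rg out) := by unfold Spec_valida_rg; infer_instance

-- ===== CLAIM (what is proved, stated in full; the proofs are below) =====
def Claim_equal_valida_rg : Prop := ∀ (rg : String), Dom_valida_rg rg → Spec_valida_rg rg (valida_rg rg)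

-- ===== LEMMAS AND PROOFS =====

lemma exists_eleven (l : List Char) (h : l.length = 11) :
    ∃ a b c d e f g h' i j k, l = [a, b, c, d, e, f, g, h', i, j, k] := by
  match l, h with
  | [a, b, c, d, e, f, g, h', i, j, k], _ =>
    exact ⟨a, b, c, d, e, f, g, h', i, j, k, rfl⟩

-- ===== VERDICT (by name: the statement is the Claim_ definition above) =====
theorem valida_rg_spec : Claim_equal_valida_rg := by
  intro rg _
  unfold Spec_valida_rg valida_rg valida_rg_alt
  by_cases h : rg.toList.length = 11
  · obtain ⟨a, b, c, d, e, f, g, h', i, j, k, hl⟩ := exists_eleven rg.toList h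
    rw [hl] at *
    simp only [h, PySem.Str.len_eq]
    simp [List.range_succ, PySem.List.pyRange, PySem.List.pyGetD,
      PySem.Chars.slice, PySem.Chars.strIsdigit, PySem.List.slice,
      Bool.and_assoc, Bool.and_comm, Bool.and_left_comm]
    rfl
  · have h' : ((rg.length : Int) ≠ 11) := by
      rw [← String.length_toList]; exact_mod_cast h
    simp [PySem.Str.len_eq, h']
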